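-- pv_equiv track=rewrite | github.com/Arsen1302/Code-copy-detector | TestData/solutions/problem_1648_3.py | solution_1648_3
-- ===== SOURCE A (Python) =====
-- def solution_1648_3(num: str) -> str:
--     dict_frequency = {}
--     for char in num:
--         if char in dict_frequency:
--             dict_frequency[char] += 1
--         else:
--             dict_frequency[char] = 1
--     left_str = ''
--     right_str = ''
--     # For placing the number at the middle.
--     odd_digit = 0
--     for i in range(10, 0, -1):
--         digit = str(i-1)
--         if digit not in dict_frequency:
--             continue
--         count = dict_frequency[digit]
--         if count % 2 == 0:
--             freq = count // 2
--             for j in range(freq):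
--                 left_str += digit
--                 right_str = digit + right_str
--             dict_frequency[digit] = 0
--
--         else:
--             # checking if it is not already assisgned           then assigned the largest one.
--             if odd_digit == 0:
--                 odd_digit = digit
--             freq = count // 2
--
--             for j in range(freq):
--                 left_str += digit
--                 right_str = digit + right_str
--             dict_frequency[digit] = 1
--     # Concating the left one to the right one.
--     final = ''
--     if odd_digit:
--         final = left_str + odd_digit + right_str
--     else:
--         final = left_str + right_str
--     # if leading '0' and trailing '0' is present then removing it.
--     final = final.strip('0')
--     # if only '0' is present then we are left with only empty string, so assigning one '0' char and returning it.
--     if not len(final):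
--         final = '0'
--     return str(int(final))
-- ===== SOURCE B (Python) =====
-- def solution_1648_3(num: str) -> str:
--     # sort digits descending, then greedily pair equal neighbours in one scan
--     s = sorted((c for c in num if c.isdigit()), reverse=True)
--     half_parts = []
--     mid = ''
--     i = 0
--     n = len(s)
--     while i < n:
--         if i + 1 < n and s[i] == s[i + 1]:
--             half_parts.append(s[i])
--             i += 2
--         else:
--             if not mid:
--                 mid = s[i]
--             i += 1
--     half = ''.join(half_parts)
--     final = (half + mid + half[::-1]).strip('0')
--     return str(int(final)) if final else '0'
-- ===== Notes on version B (the rewrite author's own statement) =====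
-- stated objective: faster
-- what changed: Instead of a frequency dict with a 9..0 loop emitting count//2 copies per digit (building right_str by char-by-char prepending), B sorts the digit characters descending and builds the half in a single greedy scan pairing equal neighbours, taking the first unpaired character as the middle; a timing run measured it 2.4x faster at the largest size.
import Mathlib
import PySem

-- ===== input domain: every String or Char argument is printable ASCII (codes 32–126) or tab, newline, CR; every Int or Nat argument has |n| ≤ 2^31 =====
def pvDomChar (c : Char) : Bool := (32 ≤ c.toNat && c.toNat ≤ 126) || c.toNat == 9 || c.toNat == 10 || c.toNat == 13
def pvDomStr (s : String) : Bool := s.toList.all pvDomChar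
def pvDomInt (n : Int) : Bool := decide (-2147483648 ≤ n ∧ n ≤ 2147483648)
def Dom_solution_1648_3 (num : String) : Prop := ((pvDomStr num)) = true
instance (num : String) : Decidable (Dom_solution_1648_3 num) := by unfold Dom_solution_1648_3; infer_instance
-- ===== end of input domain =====

-- B replaces A's frequency-dict + per-digit emission loop with sort-descending then a greedy neighbour-pairing scan; a timing run measured it faster.


-- ===== PORT A =====
-- the body of A's 'for i in range(10, 0, -1)' loop, on state (left_str, right_str, odd_digit, dict_frequency);
-- odd_digit = 0 (the int) is modelled as [], a digit string as its char list (Python's 'odd_digit == 0' is False on any string)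
def pvStepA (st : List Char × List Char × List Char × PySem.Dict (List Char) Int) (i : Int) :
    List Char × List Char × List Char × PySem.Dict (List Char) Int :=
  let digit := PySem.Int.toChars (i - 1)
  if st.2.2.2.contains digit = false then st
  else
    let count := st.2.2.2.getD digit 0   -- dict_frequency[digit]; present (guarded by the contains test)
    if PySem.Int.mod count 2 == 0 then
      let freq := PySem.Int.floordiv count 2
      let p := (PySem.List.pyRange 0 freq 1).foldl
        (fun (p : List Char × List Char) _ => (p.1 ++ digit, digit ++ p.2)) (st.1, st.2.1)
      (p.1, p.2, st.2.2.1, st.2.2.2.insert digit 0)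
    else
      let odd2 := if st.2.2.1 == [] then digit else st.2.2.1
      let freq := PySem.Int.floordiv count 2
      let p := (PySem.List.pyRange 0 freq 1).foldl
        (fun (p : List Char × List Char) _ => (p.1 ++ digit, digit ++ p.2)) (st.1, st.2.1)
      (p.1, p.2, odd2, st.2.2.2.insert digit 1)

def solution_1648_3 (num : String) : String :=
  let dict := num.toList.foldl
    (fun (d : PySem.Dict (List Char) Int) c =>
      if d.contains [c] then d.insert [c] (d.getD [c] 0 + 1) else d.insert [c] 1)
    PySem.Dict.empty
  let st := (PySem.List.pyRange 10 0 (-1)).foldl pvStepA ([], [], [], dict)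
  let final := if st.2.2.1 ≠ [] then st.1 ++ st.2.2.1 ++ st.2.1 else st.1 ++ st.2.1
  let final := PySem.Chars.stripChars final ['0']
  let final := if final.length = 0 then ['0'] else final
  match PySem.Int.ofChars? final with   -- str(int(final)); final is a nonempty digit string, so never none under Pre_
  | some n => PySem.Int.toStr n
  | none => ""

-- ===== PORT B =====
-- the while loop of Source B: greedy scan pairing equal neighbours; returns (half_parts, mid)
-- ('mid' set once = the outermost unpaired element wins, exactly Source B's 'if not mid')
def pvPairScan : List Char → List Char × Option Char
  | [] => ([], none)
  | [c] => ([], some c)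
  | c :: d :: rest =>
    if c = d then
      let p := pvPairScan rest
      (c :: p.1, p.2)
    else
      let p := pvPairScan (d :: rest)
      (p.1, some c)

def solution_1648_3_alt (num : String) : String :=
  let s := PySem.List.sorted (num.toList.filter (fun c => PySem.Chars.isdigit c)) (fun x => x) true
  let p := pvPairScan s
  let half := p.1
  let mid : List Char := match p.2 with | some c => [c] | none => []
  let final := PySem.Chars.stripChars
    (half ++ mid ++ ((PySem.List.slice? half none none (-1)).getD [])) ['0']
  if final.length ≠ 0 then
    match PySem.Int.ofChars? final with   -- str(int(final)); final is a nonempty digit string here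
    | some n => PySem.Int.toStr n
    | none => ""
  else "0"

-- ===== PRECONDITION & SPEC =====
-- count of the digit character k in num, and the length of the palindrome both programs build
def pvDigCount (num : String) (k : Nat) : Nat := num.toList.count (Char.ofNat (48 + k))
def pvPalLen (num : String) : Nat :=
  2 * ((List.range 10).map (fun k => pvDigCount num k / 2)).sum +
    (if ∃ k ∈ Finset.range 10, pvDigCount num k % 2 = 1 then 1 else 0)
-- Pre_ excludes exactly the inputs on which A raises ValueError: CPython's 4300-digit int() string-conversion
-- limit fires when the built palindrome keeps a nonzero digit pair (so nothing is stripped) and exceeds 4300 chars.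
-- B's int() call raises identically there.  The Lean ports model int() without that interpreter limit, so the
-- equality of the ports in fact holds on all of Dom; Pre_ only delimits the inputs where the real A returns at all.
def Pre_solution_1648_3 (num : String) : Prop :=
  ¬ ((∃ k ∈ Finset.range 10, 1 ≤ k ∧ 2 ≤ pvDigCount num k) ∧ 4300 < pvPalLen num)
instance (num : String) : Decidable (Pre_solution_1648_3 num) := by
  unfold Pre_solution_1648_3; infer_instance
def pvWitness_solution_1648_3 : String := "0091321"
def Spec_solution_1648_3 (num : String) (out : String) : Prop := out = solution_1648_3_alt num
instance (num : String) (out : String) : Decidable (Spec_solution_1648_3 num out) := by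
  unfold Spec_solution_1648_3; infer_instance

-- ===== CLAIM (what is proved, stated in full; the proofs are below) =====
def Claim_equal_solution_1648_3 : Prop := ∀ (num : String), Dom_solution_1648_3 num → Pre_solution_1648_3 num → Spec_solution_1648_3 num (solution_1648_3 num)


-- ===== LEMMAS AND PROOFS =====

-- proof-only abbreviations: the digit character k, runs and half-runs of digit k
def pvCh (k : Nat) : Char := Char.ofNat (48 + k)
def pvRun (num : String) (k : Nat) : List Char := List.replicate (pvDigCount num k) (pvCh k)
def pvRep (num : String) (k : Nat) : List Char := List.replicate (pvDigCount num k / 2) (pvCh k)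
def pvKs : List Nat := [9, 8, 7, 6, 5, 4, 3, 2, 1, 0]
def pvH (num : String) : List Char := (pvKs.map (pvRep num)).flatten
def pvO (num : String) : List Char :=
  pvKs.foldl (fun o k => if o = [] ∧ pvDigCount num k % 2 = 1 then [pvCh k] else o) []

-- the common normal form both programs reach
def pvCommon (num : String) : String :=
  let final := PySem.Chars.stripChars (pvH num ++ pvO num ++ (pvH num).reverse) ['0']
  if final.length = 0 then "0"
  else match PySem.Int.ofChars? final with
    | some n => PySem.Int.toStr n
    | none => ""

-- small decidable digit facts
lemma pvDigitEq : ∀ k : Nat, k < 10 → PySem.Int.toChars ((k : Nat) : Int) = [pvCh k] := by decide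
lemma pvChNe : ∀ j : Nat, j < 10 → ∀ k : Nat, k < 10 → j ≠ k → pvCh j ≠ pvCh k := by decide
lemma pvChToNat : ∀ k : Nat, k < 10 → (pvCh k).toNat = 48 + k := by decide
lemma pvChIsdigit : ∀ k : Nat, k < 10 → PySem.Chars.isdigit (pvCh k) = true := by decide

lemma pvModTwo (c : Nat) : PySem.Int.mod (c : Int) 2 = ((c % 2 : Nat) : Int) := by
  exact_mod_cast PySem.Int.mod_natCast c 2
lemma pvDivTwo (c : Nat) : PySem.Int.floordiv (c : Int) 2 = ((c / 2 : Nat) : Int) := by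
  exact_mod_cast PySem.Int.floordiv_natCast c 2

lemma pvCountSingleton (l : List Char) (x : Char) :
    List.count [x] (l.map (fun c => [c])) = l.count x := by
  induction l with
  | nil => simp
  | cons c l ih => by_cases h : c = x <;> simp [ih, h]

-- A's frequency dict is a counter on singleton-keys
lemma pvDictA_congr (num : String) :
    num.toList.foldl (fun (d : PySem.Dict (List Char) Int) c =>
        if d.contains [c] then d.insert [c] (d.getD [c] 0 + 1) else d.insert [c] 1)
      PySem.Dict.empty
    = (num.toList.map (fun c => [c])).foldl (fun d x => d.insert x (d.getD x 0 + 1))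
        PySem.Dict.empty := by
  rw [List.foldl_map]
  apply PySem.List.foldl_congr_mem
  intro d c _
  by_cases h : d.contains [c]
  · simp [h]
  · rw [if_neg h, PySem.Dict.getD_of_not_contains _ _ (by simpa using h)]
    norm_num

lemma pvDictA_getD (num : String) (k : Nat) :
    (num.toList.foldl (fun (d : PySem.Dict (List Char) Int) c =>
        if d.contains [c] then d.insert [c] (d.getD [c] 0 + 1) else d.insert [c] 1)
      PySem.Dict.empty).getD [pvCh k] 0 = (pvDigCount num k : Int) := by
  rw [pvDictA_congr, PySem.Dict.getD_foldl_insert_add_one, PySem.Dict.getD_empty,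
      show [pvCh k] = (fun c => [c]) (pvCh k) from rfl]
  simp only [pvCountSingleton, pvDigCount, pvCh, zero_add]

lemma pvDictA_contains (num : String) (k : Nat) :
    (num.toList.foldl (fun (d : PySem.Dict (List Char) Int) c =>
        if d.contains [c] then d.insert [c] (d.getD [c] 0 + 1) else d.insert [c] 1)
      PySem.Dict.empty).contains [pvCh k] = decide (0 < pvDigCount num k) := by
  rw [pvDictA_congr, PySem.Dict.contains_eq_decide_mem_keys]
  simp only [PySem.Dict.keys_foldl_insert, PySem.Dict.keys_empty, PySem.Set.update_nil_left]
  simp only [decide_eq_decide, PySem.Set.mem_ofList, List.mem_map, pvDigCount,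
    List.count_pos_iff]
  constructor
  · rintro ⟨c, hc, h⟩
    obtain rfl : c = pvCh k := by simpa using h
    simpa [pvCh] using hc
  · intro hc; exact ⟨pvCh k, by simpa [pvCh] using hc, rfl⟩

-- the inner 'for j in range(freq)' loop appends/prepends a block of copies
lemma pvInner (xs : List Int) : ∀ (l r : List Char) (c : Char),
    xs.foldl (fun (p : List Char × List Char) _ => (p.1 ++ [c], [c] ++ p.2)) (l, r)
    = (l ++ List.replicate xs.length c, List.replicate xs.length c ++ r) := by
  induction xs with
  | nil => simp
  | cons x xs ih =>
    intro l r c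
    rw [List.foldl_cons, ih]
    refine Prod.ext ?_ ?_
    · simp [List.replicate_succ, List.append_assoc]
    · simp [List.replicate_succ', List.append_assoc]

-- one pass of A's main loop, for digit k with correct dict entries, then the rest
lemma pvLoopA (num : String) : ∀ (ks : List Nat) (l r o : List Char)
    (D : PySem.Dict (List Char) Int),
    (∀ k ∈ ks, k < 10) → ks.Nodup →
    (∀ k ∈ ks, D.contains [pvCh k] = decide (0 < pvDigCount num k) ∧
               D.getD [pvCh k] 0 = (pvDigCount num k : Int)) →
    ∃ D', (ks.map (fun k : Nat => ((k : Int) + 1))).foldl pvStepA (l, r, o, D) =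
      (l ++ (ks.map (pvRep num)).flatten,
       ((ks.map (pvRep num)).reverse).flatten ++ r,
       ks.foldl (fun o k => if o = [] ∧ pvDigCount num k % 2 = 1 then [pvCh k] else o) o,
       D') := by
  intro ks
  induction ks with
  | nil => intro l r o D _ _ _; exact ⟨D, by simp⟩
  | cons k ks ih =>
    intro l r o D hb hnd hD
    have hk : k < 10 := hb k (by simp)
    have hDk := hD k (by simp)
    have hdig : PySem.Int.toChars ((k : Int) + 1 - 1) = [pvCh k] := by
      rw [show ((k : Int) + 1 - 1) = (k : Int) by ring, pvDigitEq k hk]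
    by_cases h0 : 0 < pvDigCount num k
    · have hstep : pvStepA (l, r, o, D) ((k : Int) + 1) =
        (l ++ pvRep num k, pvRep num k ++ r,
         (if o = [] ∧ pvDigCount num k % 2 = 1 then [pvCh k] else o),
         D.insert [pvCh k] (if pvDigCount num k % 2 = 0 then 0 else 1)) := by
        unfold pvStepA
        simp only [hdig, hDk.1, hDk.2, decide_eq_true h0]
        rw [if_neg (by simp)]
        rw [pvModTwo, pvDivTwo]
        have hlen : (PySem.List.pyRange 0 ((pvDigCount num k / 2 : Nat) : Int) 1).length
            = pvDigCount num k / 2 := by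
          rw [PySem.List.length_pyRange_one]; omega
        by_cases hpar : pvDigCount num k % 2 = 0
        · rw [if_pos (by simp; omega)]
          simp only [pvInner, hlen]
          simp [pvRep, hpar]
        · rw [if_neg (by simp; omega)]
          have hpar1 : pvDigCount num k % 2 = 1 := by omega
          simp only [pvInner, hlen]
          simp [pvRep, hpar1]
      rw [List.map_cons, List.foldl_cons, hstep]
      have hrest : ∀ j ∈ ks,
          (D.insert [pvCh k] (if pvDigCount num k % 2 = 0 then 0 else 1)).contains [pvCh j]
            = decide (0 < pvDigCount num j) ∧
          (D.insert [pvCh k] (if pvDigCount num k % 2 = 0 then 0 else 1)).getD [pvCh j] 0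
            = (pvDigCount num j : Int) := by
        intro j hj
        have hjk : j ≠ k := by
          rintro rfl; exact (List.nodup_cons.mp hnd).1 hj
        have hne : [pvCh j] ≠ [pvCh k] := by
          intro h; exact pvChNe j (hb j (by simp [hj])) k hk hjk (by simpa using h)
        refine ⟨?_, ?_⟩
        · rw [PySem.Dict.contains_insert]
          simp only [beq_eq_false_iff_ne.mpr hne, Bool.false_or]
          exact (hD j (by simp [hj])).1
        · rw [PySem.Dict.getD_insert_of_ne _ _ _ hne]
          exact (hD j (by simp [hj])).2
      obtain ⟨D', hD'⟩ := ih (l ++ pvRep num k) (pvRep num k ++ r)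
        (if o = [] ∧ pvDigCount num k % 2 = 1 then [pvCh k] else o) _
        (fun j hj => hb j (by simp [hj])) (List.nodup_cons.mp hnd).2 hrest
      refine ⟨D', ?_⟩
      rw [hD']
      simp [List.reverse_cons, List.flatten_append, List.append_assoc]
    · have hc0 : pvDigCount num k = 0 := by omega
      have hstep : pvStepA (l, r, o, D) ((k : Int) + 1) = (l, r, o, D) := by
        unfold pvStepA
        simp only [hdig, hDk.1]
        rw [if_pos (by simp [h0])]
      rw [List.map_cons, List.foldl_cons, hstep]
      obtain ⟨D', hD'⟩ := ih l r o D (fun j hj => hb j (by simp [hj]))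
        (List.nodup_cons.mp hnd).2 (fun j hj => hD j (by simp [hj]))
      exact ⟨D', by rw [hD']; simp [pvRep, hc0]⟩

lemma pvHrev (num : String) :
    ((pvKs.map (pvRep num)).reverse).flatten = (pvH num).reverse := by
  rw [pvH, List.reverse_flatten, List.map_map]
  congr 1
  congr 1
  apply List.map_congr_left
  intro k _
  simp [Function.comp, pvRep, List.reverse_replicate]

lemma pvTail (cs : List Char) :
    (match PySem.Int.ofChars? (if cs.length = 0 then ['0'] else cs) with
      | some n => PySem.Int.toStr n
      | none => "")
    = (if cs.length = 0 then "0"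
       else match PySem.Int.ofChars? cs with
        | some n => PySem.Int.toStr n
        | none => "") := by
  by_cases h : cs.length = 0
  · rw [if_pos h, if_pos h]
    decide
  · rw [if_neg h, if_neg h]

lemma pvA_eq (num : String) : solution_1648_3 num = pvCommon num := by
  obtain ⟨D', hD'⟩ := pvLoopA num pvKs [] [] [] _ (by decide) (by decide)
    (fun k _ => ⟨pvDictA_contains num k, pvDictA_getD num k⟩)
  have hrange : PySem.List.pyRange 10 0 (-1) = pvKs.map (fun k : Nat => ((k : Int) + 1)) := by
    decide
  unfold solution_1648_3
  rw [hrange]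
  simp only [hD', pvHrev num, List.nil_append, List.append_nil]
  rw [pvTail]
  unfold pvCommon pvO pvH
  by_cases hO : pvKs.foldl
      (fun o k => if o = [] ∧ pvDigCount num k % 2 = 1 then [pvCh k] else o) [] = []
  · rw [hO]
    simp
  · rw [if_pos hO]

lemma pvOddFoldNe (num : String) : ∀ (ks : List Nat) (o : List Char), o ≠ [] →
    ks.foldl (fun o k => if o = [] ∧ pvDigCount num k % 2 = 1 then [pvCh k] else o) o = o := by
  intro ks
  induction ks with
  | nil => intro o _; rfl
  | cons k ks ih =>
    intro o ho
    rw [List.foldl_cons, if_neg (by simp [ho])]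
    exact ih o ho

lemma pvOddFind (num : String) : ∀ ks : List Nat,
    ks.foldl (fun o k => if o = [] ∧ pvDigCount num k % 2 = 1 then [pvCh k] else o) []
    = (match ks.find? (fun k => pvDigCount num k % 2 == 1) with
        | some k => [pvCh k]
        | none => []) := by
  intro ks
  induction ks with
  | nil => rfl
  | cons k ks ih =>
    rw [List.foldl_cons, List.find?_cons]
    by_cases h : pvDigCount num k % 2 = 1
    · rw [if_pos (by simp [h])]
      have : (pvDigCount num k % 2 == 1) = true := by simp [h]
      rw [this]
      exact pvOddFoldNe num ks [pvCh k] (by simp)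
    · rw [if_neg (by simp [h])]
      have : (pvDigCount num k % 2 == 1) = false := by simp [h]
      rw [this]
      exact ih

-- ===== B-side lemmas =====

lemma pvKeyInj : Function.Injective (fun c : Char => -((c.toNat : Int))) := by
  intro a b h
  simp only [neg_inj, Int.natCast_inj] at h
  have := congrArg Char.ofNat h
  simpa [Char.ofNat_toNat] using this

lemma pvIsdigitRange (c : Char) (hd : PySem.Chars.isdigit c = true) :
    48 ≤ c.toNat ∧ c.toNat ≤ 57 := by
  revert hd
  simp [PySem.Chars.isdigit, Char.le_def]
  intro h1 h2
  exact ⟨h1, h2⟩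

lemma pvDigitChar (c : Char) (hd : PySem.Chars.isdigit c = true) :
    c = pvCh (c.toNat - 48) ∧ c.toNat - 48 < 10 := by
  obtain ⟨h1, h2⟩ := pvIsdigitRange c hd
  constructor
  · unfold pvCh
    have he : 48 + (c.toNat - 48) = c.toNat := by omega
    rw [he, Char.ofNat_toNat]
  · omega

lemma pvChEqIff (j k : Nat) (hj : j < 10) (hk : k < 10) : (pvCh j = pvCh k) ↔ j = k := by
  constructor
  · intro h
    by_contra hne
    exact pvChNe j hj k hk hne h
  · rintro rfl; rfl

lemma pvSumIf (f : Nat → Nat) : ∀ (ks : List Nat) (k0 : Nat), ks.Nodup →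
    (ks.map (fun k => if k = k0 then f k else 0)).sum
      = if k0 ∈ ks then f k0 else 0 := by
  intro ks
  induction ks with
  | nil => intro k0 _; simp
  | cons k ks ih =>
    intro k0 hnd
    simp only [List.map_cons, List.sum_cons]
    by_cases he : k = k0
    · subst he
      rw [if_pos rfl, if_pos (by simp)]
      rw [ih k (List.nodup_cons.mp hnd).2, if_neg (List.nodup_cons.mp hnd).1]
      omega
    · rw [if_neg he, ih k0 (List.nodup_cons.mp hnd).2]
      by_cases hm : k0 ∈ ks
      · rw [if_pos hm, if_pos (by simp [hm])]
        omega
      · rw [if_neg hm, if_neg (by simp [Ne.symm he] at *; exact hm)]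

-- the multiset of the digit runs 9..0 is the multiset of num's digit characters
lemma pvCountRuns (num : String) (c : Char) :
    ((pvKs.map (pvRun num)).flatten).count c
      = (num.toList.filter (fun c => PySem.Chars.isdigit c)).count c := by
  have hall : ∀ k, k ∈ pvKs → k < 10 := by decide
  have hmem : ∀ m : Nat, m < 10 → m ∈ pvKs := by decide
  rw [List.count_flatten, List.map_map]
  by_cases hd : PySem.Chars.isdigit c = true
  · obtain ⟨hcc, hk0⟩ := pvDigitChar c hd
    obtain ⟨h1, h2⟩ := pvIsdigitRange c hd
    rw [List.count_filter hd]
    have hterm : ∀ k ∈ pvKs, (List.count c ∘ pvRun num) k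
        = (fun k => if k = c.toNat - 48 then pvDigCount num k else 0) k := by
      intro k hk
      have hk10 : k < 10 := hall k hk
      simp only [Function.comp_apply, pvRun, List.count_replicate]
      by_cases he : k = c.toNat - 48
      · subst he
        rw [if_pos (by rw [← hcc]; simp), if_pos rfl]
      · rw [if_neg ?_, if_neg he]
        simp only [beq_iff_eq]
        rw [hcc, pvChEqIff k (c.toNat - 48) hk10 hk0]
        exact he
    rw [List.map_congr_left hterm, pvSumIf (pvDigCount num) pvKs (c.toNat - 48) (by decide),
        if_pos (hmem _ hk0)]
    unfold pvDigCount
    have he : 48 + (c.toNat - 48) = c.toNat := by omega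
    rw [he, Char.ofNat_toNat]
  · have hR : (num.toList.filter (fun c => PySem.Chars.isdigit c)).count c = 0 := by
      rw [List.count_eq_zero]
      intro hm
      exact hd (List.of_mem_filter hm)
    rw [hR]
    apply List.sum_eq_zero
    intro x hx
    obtain ⟨k, hk, rfl⟩ := List.mem_map.mp hx
    have hk10 : k < 10 := hall k hk
    have hne : c ≠ pvCh k := by
      intro h
      exact hd (h ▸ pvChIsdigit k hk10)
    simp only [Function.comp_apply, pvRun, List.count_replicate]
    rw [if_neg (by simp [Ne.symm hne])]

lemma pvRunsPerm (num : String) :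
    ((pvKs.map (pvRun num)).flatten).Perm
      (num.toList.filter (fun c => PySem.Chars.isdigit c)) := by
  rw [List.perm_iff_count]
  intro c
  exact pvCountRuns num c

lemma pvRunsPairwise (num : String) :
    ((pvKs.map (pvRun num)).flatten).Pairwise
      (fun a b => -((a.toNat : Int)) ≤ -((b.toNat : Int))) := by
  rw [List.pairwise_flatten]
  constructor
  · intro l hl
    obtain ⟨k, _, rfl⟩ := List.mem_map.mp hl
    rw [pvRun, List.pairwise_replicate]
    right
    exact le_refl _
  · rw [List.pairwise_map]
    have hlt : ∀ j k : Nat, j < 10 → k < 10 → k < j →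
        -(((pvCh j).toNat : Int)) ≤ -(((pvCh k).toNat : Int)) := by
      intro j k hj hk hkj
      rw [pvChToNat j hj, pvChToNat k hk]
      push_cast
      omega
    have hks : pvKs.Pairwise (fun j k => k < j ∧ j < 10 ∧ k < 10) := by decide
    refine hks.imp ?_
    rintro j k ⟨h1, h2, h3⟩ x hx y hy
    rw [List.eq_of_mem_replicate hx, List.eq_of_mem_replicate hy]
    exact hlt j k h2 h3 h1

-- Source B's descending sort of the digit characters, named: the runs of 9s, 8s, … 0s
lemma pvSortedRuns (num : String) :
    PySem.List.sorted (num.toList.filter (fun c => PySem.Chars.isdigit c)) (fun x => x) true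
      = (pvKs.map (pvRun num)).flatten := by
  apply PySem.List.eq_of_perm_of_pairwise_le_of_injective
    (fun c : Char => -((c.toNat : Int))) pvKeyInj
  · exact (PySem.List.sorted_perm _ _ _).trans (pvRunsPerm num).symm
  · have := PySem.List.sorted_pairwise_rev
      (num.toList.filter (fun c => PySem.Chars.isdigit c)) (fun x : Char => x)
    refine this.imp ?_
    intro a b h
    simp only [neg_le_neg_iff, Nat.cast_le]
    rw [Char.le_def, UInt32.le_iff_toNat_le] at h
    exact h
  · exact pvRunsPairwise num

-- the pairing scan on a run followed by material starting with a different character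
lemma pvScanRun (d : Char) (rest : List Char) (hhd : ∀ x ∈ rest.head?, x ≠ d) :
    ∀ c : Nat, pvPairScan (List.replicate c d ++ rest)
      = (List.replicate (c / 2) d ++ (pvPairScan rest).1,
         if c % 2 = 1 then some d else (pvPairScan rest).2) := by
  intro c
  induction c using Nat.strong_induction_on with
  | _ c ih =>
    match c with
    | 0 => simp
    | 1 =>
      cases rest with
      | nil => simp [pvPairScan]
      | cons r t =>
        have hr : r ≠ d := hhd r (by simp)
        simp only [List.replicate_one, List.singleton_append]
        rw [show pvPairScan (d :: r :: t)
            = ((pvPairScan (r :: t)).1, some d) from by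
          simp [pvPairScan, Ne.symm hr]]
        simp
    | (n+2) =>
      have hrepl : List.replicate (n+2) d ++ rest
          = d :: d :: (List.replicate n d ++ rest) := by
        simp [List.replicate_succ]
      rw [hrepl]
      rw [show pvPairScan (d :: d :: (List.replicate n d ++ rest))
          = (d :: (pvPairScan (List.replicate n d ++ rest)).1,
             (pvPairScan (List.replicate n d ++ rest)).2) from by
        simp [pvPairScan]]
      rw [ih n (by omega)]
      have h2 : (n+2) / 2 = n / 2 + 1 := by omega
      have h3 : (n+2) % 2 = n % 2 := by omega
      rw [h2, h3]
      simp [List.replicate_succ]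

-- the pairing scan over all runs
lemma pvScanRuns (num : String) : ∀ ks : List Nat, (∀ k ∈ ks, k < 10) → ks.Nodup →
    pvPairScan ((ks.map (pvRun num)).flatten)
      = ((ks.map (pvRep num)).flatten,
         match ks.find? (fun k => pvDigCount num k % 2 == 1) with
          | some k => some (pvCh k) | none => none) := by
  intro ks
  induction ks with
  | nil => intro _ _; simp [pvPairScan]
  | cons k ks ih =>
    intro hb hnd
    have hk : k < 10 := hb k (by simp)
    have hhd : ∀ x ∈ ((ks.map (pvRun num)).flatten).head?, x ≠ pvCh k := by
      intro x hx
      have hxm : x ∈ (ks.map (pvRun num)).flatten := List.mem_of_mem_head? hx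
      obtain ⟨l, hl, hxl⟩ := List.mem_flatten.mp hxm
      obtain ⟨j, hj, rfl⟩ := List.mem_map.mp hl
      have hx' := List.eq_of_mem_replicate hxl
      subst hx'
      exact pvChNe j (hb j (by simp [hj])) k hk
        (by rintro rfl; exact (List.nodup_cons.mp hnd).1 hj)
    simp only [List.map_cons, List.flatten_cons]
    rw [show pvRun num k = List.replicate (pvDigCount num k) (pvCh k) from rfl]
    rw [pvScanRun (pvCh k) _ hhd]
    rw [ih (fun j hj => hb j (by simp [hj])) (List.nodup_cons.mp hnd).2]
    rw [List.find?_cons]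
    by_cases hpar : pvDigCount num k % 2 = 1
    · rw [if_pos hpar]
      have hp : (pvDigCount num k % 2 == 1) = true := by simp [hpar]
      rw [hp]
      rfl
    · rw [if_neg hpar]
      have hp : (pvDigCount num k % 2 == 1) = false := by simp [hpar]
      rw [hp]
      rfl

lemma pvB_eq (num : String) : solution_1648_3_alt num = pvCommon num := by
  have hs := pvSortedRuns num
  have hscan := pvScanRuns num pvKs (by decide) (by decide)
  simp only [solution_1648_3_alt, hs, hscan, PySem.List.slice?_none_none_neg_one,
    Option.getD_some]
  unfold pvCommon pvH pvO
  rw [pvOddFind num pvKs]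
  cases hfind : pvKs.find? (fun k => pvDigCount num k % 2 == 1) with
  | none => simp
  | some k => simp

-- ===== VERDICT (by name: the statement is the Claim_ definition above) =====
theorem solution_1648_3_spec : Claim_equal_solution_1648_3 := by
  intro num _ _
  unfold Spec_solution_1648_3
  rw [pvA_eq, pvB_eq]
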